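-- pv_equiv track=rewrite | github.com/sousinha1997/Quisby | quisby/benchmarks/fio/fio.py | split_into_parts
-- ===== SOURCE A (Python) =====
-- def split_into_parts(data):
--     result = []
--     temp = []
--
--     # Iterate through the data
--     for item in data:
--         if item == "\n":
--             if temp:
--                 result.append(temp)
--                 temp = []
--         else:
--             temp.append(item)
--
--     # Append the last group if it's not empty
--     if temp:
--         result.append(temp)
--     return result
-- ===== SOURCE B (Python) =====
-- from itertools import groupby
--
--
-- def split_into_parts(data):
--     return [list(group) for is_marker, group in
--             groupby(data, key=lambda x: x == "\n") if not is_marker]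
-- ===== Notes on version B (the rewrite author's own statement) =====
-- stated objective: idiomatic
-- what changed: Replaced the per-element accumulate-and-flush loop with itertools.groupby over runs keyed by 'is newline marker', keeping the non-marker runs; no temp buffer or emptiness guards remain.
import Mathlib
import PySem

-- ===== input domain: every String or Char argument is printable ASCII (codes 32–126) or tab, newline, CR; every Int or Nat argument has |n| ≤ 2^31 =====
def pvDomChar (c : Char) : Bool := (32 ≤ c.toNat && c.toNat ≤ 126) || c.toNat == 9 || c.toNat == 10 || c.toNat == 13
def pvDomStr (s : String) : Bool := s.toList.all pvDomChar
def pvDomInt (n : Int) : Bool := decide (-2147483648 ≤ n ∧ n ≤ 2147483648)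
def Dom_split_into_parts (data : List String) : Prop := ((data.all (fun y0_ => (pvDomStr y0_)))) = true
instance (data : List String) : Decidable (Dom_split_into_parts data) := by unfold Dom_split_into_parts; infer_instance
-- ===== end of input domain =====

-- B replaces A's accumulate-and-flush loop by grouping consecutive runs split at "\n" markers (idiomatic, same cost).


-- ===== PORT A =====
-- one step of A's loop over state (result, temp)
def splitStepA (s : List (List String) × List String) (item : String) :
    List (List String) × List String :=
  if item = "\n" then
    (if s.2 ≠ [] then (s.1 ++ [s.2], []) else s)
  else
    (s.1, s.2 ++ [item])

def split_into_parts (data : List String) : List (List String) :=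
  let s := data.foldl splitStepA ([], [])
  if s.2 ≠ [] then s.1 ++ [s.2] else s.1

-- ===== PORT B =====
-- B iterates over the consecutive runs of data keyed by "is the marker",
-- keeping each non-marker run and dropping marker elements.
def splitRunsB : List String → List (List String)
  | [] => []
  | x :: xs =>
    if x = "\n" then splitRunsB xs
    else (x :: xs.takeWhile (· ≠ "\n")) :: splitRunsB (xs.dropWhile (· ≠ "\n"))
termination_by l => l.length
decreasing_by
  · simp
  · simp only [List.length_cons]
    exact Nat.lt_succ_of_le (List.length_dropWhile_le _ _)

def split_into_parts_alt (data : List String) : List (List String) := splitRunsB data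

-- ===== PRECONDITION & SPEC =====
def Spec_split_into_parts (data : List String) (out : List (List String)) : Prop := out = split_into_parts_alt data
instance (data : List String) (out : List (List String)) : Decidable (Spec_split_into_parts data out) := by unfold Spec_split_into_parts; infer_instance

-- ===== CLAIM (what is proved, stated in full; the proofs are below) =====
def Claim_equal_split_into_parts : Prop := ∀ (data : List String), Dom_split_into_parts data → Spec_split_into_parts data (split_into_parts data)

-- ===== LEMMAS AND PROOFS =====

-- A's final flush, as a helper for the loop-invariant lemma
def finishA (s : List (List String) × List String) : List (List String) :=
  if s.2 ≠ [] then s.1 ++ [s.2] else s.1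

-- invariant of A's loop: the flushed final state equals the already-emitted
-- groups followed by the runs of the remaining data, the pending `temp`
-- prefixing the first run
theorem splitRunsB_fold (data : List String) :
    ∀ (res : List (List String)) (temp : List String),
      finishA (data.foldl splitStepA (res, temp)) =
      res ++ (if temp = [] then splitRunsB data
              else (temp ++ data.takeWhile (· ≠ "\n")) ::
                   splitRunsB (data.dropWhile (· ≠ "\n"))) := by
  induction data with
  | nil =>
    intro res temp
    by_cases h : temp = [] <;> simp [finishA, h, splitRunsB]
  | cons x xs ih =>
    intro res temp
    by_cases hx : x = "\n"
    · subst hx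
      by_cases ht : temp = []
      · subst ht
        rw [List.foldl_cons,
          show splitStepA (res, []) "\n" = (res, []) from by simp [splitStepA],
          ih res []]
        simp [splitRunsB]
      · rw [List.foldl_cons,
          show splitStepA (res, temp) "\n" = (res ++ [temp], []) from by
            simp [splitStepA, ht],
          ih (res ++ [temp]) []]
        simp [ht, splitRunsB, List.takeWhile, List.dropWhile]
    · rw [List.foldl_cons,
        show splitStepA (res, temp) x = (res, temp ++ [x]) from by
          simp [splitStepA, hx],
        ih res (temp ++ [x])]
      by_cases ht : temp = [] <;> simp [ht, splitRunsB, hx]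

-- ===== VERDICT (by name: the statement is the Claim_ definition above) =====
theorem split_into_parts_spec : Claim_equal_split_into_parts := by
  intro data _
  unfold Spec_split_into_parts split_into_parts split_into_parts_alt
  simpa [finishA] using splitRunsB_fold data [] []
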